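-- pv_equiv track=rewrite | github.com/thomas-villani/all2md | src/all2md/ast/nodes.py | _select_math_representation
-- ===== SOURCE A (Python) =====
-- from typing import TYPE_CHECKING, Any, Literal, Optional
--
-- MathNotation = Literal["latex", "mathml", "html"]
--
-- def _select_math_representation(
--     content: str,
--     notation: MathNotation,
--     representations: dict[MathNotation, str],
--     preferred: MathNotation,
-- ) -> tuple[str, MathNotation]:
--     if preferred in representations:
--         return representations[preferred], preferred
--
--     if preferred == notation:
--         return content, notation
--
--     for fallback in ("latex", "mathml", "html"):
--         if fallback in representations:
--             return representations[fallback], fallback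
--         if fallback == notation:
--             return content, notation
--
--     return content, notation
-- ===== SOURCE B (Python) =====
-- def _select_math_representation(content, notation, representations, preferred):
--     cands = [preferred, "latex", "mathml", "html"]
--     ranks = [cands.index(k) for k in representations if k in cands]
--     r_n = cands.index(notation) if notation in cands else len(cands)
--     if ranks and min(ranks) <= r_n:
--         c = cands[min(ranks)]
--         return representations[c], c
--     return content, notation
-- ===== Notes on version B (the rewrite author's own statement) =====
-- stated objective: alternative
-- what changed: Instead of testing candidates one by one with early returns, B computes the rank (index in [preferred, 'latex', 'mathml', 'html']) of every representation key, takes the minimum rank, and compares it with notation's rank to decide between the dict entry and (content, notation).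
import Mathlib
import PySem

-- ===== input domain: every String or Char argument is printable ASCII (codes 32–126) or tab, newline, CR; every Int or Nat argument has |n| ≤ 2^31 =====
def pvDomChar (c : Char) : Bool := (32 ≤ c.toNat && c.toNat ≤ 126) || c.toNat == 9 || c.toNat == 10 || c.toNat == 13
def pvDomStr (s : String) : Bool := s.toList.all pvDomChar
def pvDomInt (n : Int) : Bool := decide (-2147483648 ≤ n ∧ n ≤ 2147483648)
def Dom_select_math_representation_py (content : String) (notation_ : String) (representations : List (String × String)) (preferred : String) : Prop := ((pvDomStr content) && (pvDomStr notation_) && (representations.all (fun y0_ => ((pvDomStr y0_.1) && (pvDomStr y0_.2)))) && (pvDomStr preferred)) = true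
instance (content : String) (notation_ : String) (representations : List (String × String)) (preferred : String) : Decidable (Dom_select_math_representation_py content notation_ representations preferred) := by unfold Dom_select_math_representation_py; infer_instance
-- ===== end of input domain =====

-- B replaces A's sequential candidate checks by a rank computation: it assigns each
-- candidate its index in (preferred, "latex", "mathml", "html"), takes the minimal
-- rank among the representation keys and compares it with notation's rank — objective: alternative.


-- ===== PORT A =====
-- assoc-list lookup: Python 'k in d' / 'd[k]' (first match; Python dicts have unique keys)
def pvLookup (reps : List (String × String)) (k : String) : Option String :=
  (reps.find? (fun p => p.1 == k)).map (·.2)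

def pvFallbackLoop (content : String) (notation_ : String) (representations : List (String × String)) : List String → String × String
  | [] => (content, notation_)
  | f :: rest =>
    match pvLookup representations f with
    | some v => (v, f)
    | none =>
      if f == notation_ then (content, notation_)
      else pvFallbackLoop content notation_ representations rest

def select_math_representation_py (content : String) (notation_ : String) (representations : List (String × String)) (preferred : String) : String × String :=
  match pvLookup representations preferred with
  | some v => (v, preferred)
  | none =>
    if preferred == notation_ then (content, notation_)
    else pvFallbackLoop content notation_ representations ["latex", "mathml", "html"]

-- ===== PORT B =====
-- B: ranks = candidate-list indices of the representation keys that are candidates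
def pvRanks (reps : List (String × String)) (cands : List String) : List Nat :=
  ((reps.map Prod.fst).filter (fun k => cands.contains k)).map (fun k => cands.idxOf k)

-- B's body on an explicit candidate list (Source B after binding `cands`)
def pvSelectByRank (content : String) (notation_ : String) (reps : List (String × String)) (cands : List String) : String × String :=
  let rn := if cands.contains notation_ then cands.idxOf notation_ else cands.length
  match (pvRanks reps cands).min? with
  | some m =>
    if m ≤ rn then
      let c := cands.getD m ""
      ((pvLookup reps c).getD "", c)   -- representations[c]; c is always a present key here
    else (content, notation_)
  | none => (content, notation_)

def select_math_representation_py_alt (content : String) (notation_ : String) (representations : List (String × String)) (preferred : String) : String × String :=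
  pvSelectByRank content notation_ representations [preferred, "latex", "mathml", "html"]

-- ===== PRECONDITION & SPEC =====
def Spec_select_math_representation_py (content : String) (notation_ : String) (representations : List (String × String)) (preferred : String) (out : String × String) : Prop := out = select_math_representation_py_alt content notation_ representations preferred
instance (content : String) (notation_ : String) (representations : List (String × String)) (preferred : String) (out : String × String) : Decidable (Spec_select_math_representation_py content notation_ representations preferred out) := by unfold Spec_select_math_representation_py; infer_instance

-- ===== CLAIM (what is proved, stated in full; the proofs are below) =====
def Claim_equal_select_math_representation_py : Prop := ∀ (content : String) (notation_ : String) (representations : List (String × String)) (preferred : String), Dom_select_math_representation_py content notation_ representations preferred → Spec_select_math_representation_py content notation_ representations preferred (select_math_representation_py content notation_ representations preferred)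

-- ===== LEMMAS AND PROOFS =====

-- proof-only helper: A's control flow as one uniform loop over a candidate list
def pvCandLoop (content : String) (notation_ : String) (representations : List (String × String)) : List String → String × String
  | [] => (content, notation_)
  | cand :: rest =>
    match pvLookup representations cand with
    | some v => (v, cand)
    | none =>
      if cand == notation_ then (content, notation_)
      else pvCandLoop content notation_ representations rest

lemma fallback_eq_cand (content notation_ : String) (representations : List (String × String)) (l : List String) :
    pvFallbackLoop content notation_ representations l = pvCandLoop content notation_ representations l := by
  induction l with
  | nil => rfl
  | cons f rest ih => simp only [pvFallbackLoop, pvCandLoop, ih]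

lemma nat_min?_spec (l : List Nat) (m : Nat) (h : l.min? = some m) : m ∈ l ∧ ∀ b ∈ l, m ≤ b := by
  rw [List.min?_eq_some_iff] at h; exact h

lemma min?_map_succ (l : List Nat) : (l.map (· + 1)).min? = l.min?.map (· + 1) := by
  induction l with
  | nil => rfl
  | cons a l ih =>
    rcases h : l.min? with _ | m <;>
      simp_all [List.min?_cons, Option.elim, Nat.succ_min_succ]

lemma cand_eq_rank (content notation_ : String) (reps : List (String × String)) (cands : List String) :
    pvCandLoop content notation_ reps cands = pvSelectByRank content notation_ reps cands := by
  induction cands with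
  | nil => simp [pvCandLoop, pvSelectByRank, pvRanks]
  | cons cand rest ih =>
    rcases hf : pvLookup reps cand with _ | v
    · -- cand is not a key of reps
      have hfind : reps.find? (fun p => p.1 == cand) = none := by
        simpa [pvLookup, Option.map_eq_none_iff] using hf
      have hkey : ∀ k ∈ reps.map Prod.fst, k ≠ cand := by
        intro k hk
        obtain ⟨p, hp, rfl⟩ := List.mem_map.mp hk
        have := List.find?_eq_none.mp hfind p hp
        simpa using this
      by_cases hn : cand = notation_
      · -- loop stops at notation: every rank is ≥ 1 while notation's rank is 0
        subst hn
        have hranks : ∀ m ∈ pvRanks reps (cand :: rest), 1 ≤ m := by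
          intro m hm
          simp only [pvRanks, List.mem_map, List.mem_filter] at hm
          obtain ⟨k, ⟨hk, _⟩, rfl⟩ := hm
          obtain ⟨p, hp, rfl⟩ := hk
          have hkc : (cand == p.1) = false :=
            beq_eq_false_iff_ne.mpr (Ne.symm (hkey p.1 (List.mem_map.mpr ⟨p, hp, rfl⟩)))
          simp [List.idxOf_cons, hkc]
        simp only [pvCandLoop, hf, beq_self_eq_true, if_true, pvSelectByRank]
        rcases hm : (pvRanks reps (cand :: rest)).min? with _ | m
        · simp
        · have h1 : 1 ≤ m := hranks m (nat_min?_spec _ _ hm).1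
          have hrn : (if (cand :: rest).contains cand then (cand :: rest).idxOf cand else (cand :: rest).length) = 0 := by
            simp
          simp only [hrn]
          rw [if_neg (by omega)]
      · -- skip cand uniformly: everything shifts by one
        have hbeq : (cand == notation_) = false := beq_eq_false_iff_ne.mpr hn
        have hshift : pvRanks reps (cand :: rest) = (pvRanks reps rest).map (· + 1) := by
          simp only [pvRanks, List.map_map]
          rw [List.filter_congr (q := fun k => rest.contains k)]
          · apply List.map_congr_left
            intro k hk
            have hkc : (cand == k) = false :=
              beq_eq_false_iff_ne.mpr (Ne.symm (hkey k (List.mem_filter.mp hk).1))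
            simp [List.idxOf_cons, hkc]
          · intro k hk
            have hkc : k ≠ cand := hkey k hk
            simp [hkc]
        have hnc : notation_ ≠ cand := Ne.symm hn
        have hrn : (if (cand :: rest).contains notation_ then (cand :: rest).idxOf notation_ else (cand :: rest).length)
            = (if rest.contains notation_ then rest.idxOf notation_ else rest.length) + 1 := by
          by_cases h2 : notation_ ∈ rest <;>
            simp [List.idxOf_cons, hbeq, hnc, h2]
        simp only [pvCandLoop, hf, hbeq, Bool.false_eq_true, if_false, ih, pvSelectByRank,
          hshift, hrn, min?_map_succ]
        rcases hm : (pvRanks reps rest).min? with _ | m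
        · rfl
        · simp only [Option.map_some]
          by_cases hle : m ≤ (if rest.contains notation_ then rest.idxOf notation_ else rest.length)
          · rw [if_pos hle, if_pos (Nat.add_le_add_right hle 1)]
            simp
          · rw [if_neg hle, if_neg (fun hc => hle (Nat.le_of_succ_le_succ hc))]
    · -- cand is a key: its rank 0 is minimal and wins
      obtain ⟨p, hp, hv⟩ := Option.map_eq_some_iff.mp hf
      have hpin : p ∈ reps := List.mem_of_find?_eq_some hp
      have hpc : p.1 = cand := by
        have := List.find?_some hp; simpa using this
      have hmem : cand ∈ reps.map Prod.fst := List.mem_map.mpr ⟨p, hpin, hpc⟩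
      have h0 : 0 ∈ pvRanks reps (cand :: rest) := by
        simp only [pvRanks, List.mem_map, List.mem_filter]
        exact ⟨cand, ⟨by simpa using hmem, by simp⟩, by simp⟩
      have hmin : (pvRanks reps (cand :: rest)).min? = some 0 := by
        rcases hm : (pvRanks reps (cand :: rest)).min? with _ | m
        · rw [List.min?_eq_none_iff] at hm; rw [hm] at h0; simp at h0
        · have hle := (nat_min?_spec _ _ hm).2 0 h0
          have hz : m = 0 := by omega
          rw [hz]
      simp only [pvCandLoop, hf, pvSelectByRank, hmin]
      rw [if_pos (Nat.zero_le _)]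
      simp [pvLookup, hp, hv]

-- ===== VERDICT (by name: the statement is the Claim_ definition above) =====
theorem select_math_representation_py_spec : Claim_equal_select_math_representation_py := by
  intro content notation_ representations preferred _
  unfold Spec_select_math_representation_py select_math_representation_py select_math_representation_py_alt
  rw [← cand_eq_rank]
  simp only [pvCandLoop, fallback_eq_cand]
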